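-- pv_equiv track=rewrite | github.com/kd02109/CodingTest | SWEA/D3/13732. 정사각형 판정/정사각형 판정.py | solution
-- ===== SOURCE A (Python) =====
-- def solution(board:list):
--     lst = []
--     for i in range(len(board)):
--         for j in range(len(board)):
--             if board[i][j] == "#":
--                 lst.append([i,j])
--     total = len(lst)
--     lst_x = [lst[x][0] for x in range(len(lst))]
--     lst_y = [lst[x][1] for x in range(len(lst))]
--     min_x = min(lst_x)
--     max_x = max(lst_x)
--     min_y = min(lst_y)
--     max_y = max(lst_y)
--     x = max_x - min_x + 1
--     y = max_y - min_y + 1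
--     if x == y and x*y == total:
--         return "yes"
--     else:
--         return "no"
-- ===== SOURCE B (Python) =====
-- def solution(board: list):
--     n = len(board)
--     box = None  # (min_r, max_r, min_c, max_c) of '#' cells, maintained in one pass
--     for i in range(n):
--         for j in range(n):
--             if board[i][j] == "#":
--                 if box is None:
--                     box = (i, i, j, j)
--                 else:
--                     a, b, c, d = box
--                     box = (min(a, i), max(b, i), min(c, j), max(d, j))
--     if box is None:
--         raise ValueError("no '#' cell")
--     min_r, max_r, min_c, max_c = box
--     if max_r - min_r != max_c - min_c:
--         return "no"
--     for i in range(min_r, max_r + 1):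
--         for j in range(min_c, max_c + 1):
--             if board[i][j] != "#":
--                 return "no"
--     return "yes"
-- ===== Notes on version B (the rewrite author's own statement) =====
-- stated objective: alternative
-- what changed: B replaces A's coordinate-list building, two index comprehensions and four min/max passes plus the count==area arithmetic test by a single grid pass that maintains the bounding box as running min/max, followed by a direct fill-check loop over the bounding box only; Pre_ excludes only inputs where both programs raise (no '#' cell, or a row shorter than len(board)).
import Mathlib
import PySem

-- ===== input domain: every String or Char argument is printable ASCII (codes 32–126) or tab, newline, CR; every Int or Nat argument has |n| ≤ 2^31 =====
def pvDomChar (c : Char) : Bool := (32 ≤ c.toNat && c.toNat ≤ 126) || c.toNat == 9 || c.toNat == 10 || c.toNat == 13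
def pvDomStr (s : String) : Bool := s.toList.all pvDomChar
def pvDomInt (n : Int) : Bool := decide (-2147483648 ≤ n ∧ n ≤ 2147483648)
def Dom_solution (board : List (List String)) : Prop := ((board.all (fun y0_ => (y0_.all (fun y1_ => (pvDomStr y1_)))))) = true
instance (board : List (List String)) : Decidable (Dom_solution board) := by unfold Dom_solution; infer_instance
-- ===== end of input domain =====

-- B finds the '#' bounding box in one running-min/max pass and then fill-checks the box
-- directly, instead of A's coordinate list + four min/max passes + count==area test.

-- ===== PORT A =====
def solution (board : List (List String)) : String :=
  let n : Int := board.length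
  let lst : List (Int × Int) :=
    (PySem.List.pyRange 0 n 1).foldl (fun acc i =>
      (PySem.List.pyRange 0 n 1).foldl (fun acc j =>
        if PySem.List.pyGetD (PySem.List.pyGetD board i []) j "" = "#" then acc ++ [(i, j)]
        else acc) acc) []
  let total : Int := lst.length
  -- [lst[x][0] for x in range(len(lst))] / [lst[x][1] for x in range(len(lst))]
  let lst_x : List Int := lst.map (fun c => c.1)
  let lst_y : List Int := lst.map (fun c => c.2)
  let min_x := (PySem.List.min? lst_x (fun v => v)).getD 0
  let max_x := (PySem.List.max? lst_x (fun v => v)).getD 0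
  let min_y := (PySem.List.min? lst_y (fun v => v)).getD 0
  let max_y := (PySem.List.max? lst_y (fun v => v)).getD 0
  let x := max_x - min_x + 1
  let y := max_y - min_y + 1
  if x = y ∧ x * y = total then "yes" else "no"

-- ===== PORT B =====
def solution_alt (board : List (List String)) : String :=
  let n : Int := board.length
  let box : Option (Int × Int × Int × Int) :=
    (PySem.List.pyRange 0 n 1).foldl (fun st i =>
      (PySem.List.pyRange 0 n 1).foldl (fun st j =>
        if PySem.List.pyGetD (PySem.List.pyGetD board i []) j "" = "#" then
          match st with
          | none => some (i, i, j, j)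
          | some (a, b, c, d) => some (min a i, max b i, min c j, max d j)
        else st) st) none
  match box with
  | none => "no"  -- Python B raises ValueError here; excluded by Pre_solution
  | some (minR, maxR, minC, maxC) =>
    if maxR - minR ≠ maxC - minC then "no"
    else if (PySem.List.pyRange minR (maxR + 1) 1).all (fun i =>
              (PySem.List.pyRange minC (maxC + 1) 1).all (fun j =>
                PySem.List.pyGetD (PySem.List.pyGetD board i []) j "" == "#")) then "yes"
    else "no"

-- ===== PRECONDITION & SPEC =====
-- Pre_ excludes exactly the inputs where the Python A raises: boards with a row shorter than
-- len(board) (IndexError) and boards with no '#' among the leading n×n cells (ValueError on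
-- min of an empty list); the Python B raises on exactly the same inputs.
def Pre_solution (board : List (List String)) : Prop :=
  (∀ row ∈ board, board.length ≤ row.length) ∧
  board.any (fun row => (row.take board.length).any (fun s => s == "#")) = true
instance (board : List (List String)) : Decidable (Pre_solution board) := by
  unfold Pre_solution; infer_instance
def pvWitness_solution : List (List String) := [["#"]]
def Spec_solution (board : List (List String)) (out : String) : Prop := out = solution_alt board
instance (board : List (List String)) (out : String) : Decidable (Spec_solution board out) := by unfold Spec_solution; infer_instance

-- ===== CLAIM (what is proved, stated in full; the proofs are below) =====
def Claim_equal_solution : Prop := ∀ (board : List (List String)), Dom_solution board → Pre_solution board → Spec_solution board (solution board)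

-- ===== LEMMAS AND PROOFS =====

/-- The cell board[i][j], totalised the way both ports read it. -/
def pvCell (board : List (List String)) (i j : Int) : String :=
  PySem.List.pyGetD (PySem.List.pyGetD board i []) j ""

/-- Row-major list of index pairs. -/
def pvGridP (R S : List Int) : List (Int × Int) := R.flatMap fun i => S.map fun j => (i, j)

lemma pvGridP_eq_product (R S : List Int) : pvGridP R S = R ×ˢ S := rfl

lemma pvGridP_nodup (R S : List Int) (hR : R.Nodup) (hS : S.Nodup) : (pvGridP R S).Nodup := by
  rw [pvGridP_eq_product]; exact hR.product hS

lemma pvGridP_mem (R S : List Int) (i j : Int) : (i, j) ∈ pvGridP R S ↔ i ∈ R ∧ j ∈ S := by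
  rw [pvGridP_eq_product]; exact List.mem_product

lemma pvGridP_len (R S : List Int) : (pvGridP R S).length = R.length * S.length := by
  rw [pvGridP_eq_product]; exact List.length_product ..

/-- The '#' cells of the leading n×n sub-grid, in A's scan order. -/
def pvCs (board : List (List String)) : List (Int × Int) :=
  (pvGridP (PySem.List.pyRange 0 (board.length : Int) 1) (PySem.List.pyRange 0 (board.length : Int) 1)).filter
    (fun c => decide (pvCell board c.1 c.2 = "#"))

/-- B's one-pass bounding-box update. -/
def pvUpd (st : Option (Int × Int × Int × Int)) (c : Int × Int) : Option (Int × Int × Int × Int) :=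
  match st with
  | none => some (c.1, c.1, c.2, c.2)
  | some (a, b, d, e) => some (min a c.1, max b c.1, min d c.2, max e c.2)

lemma pvLstA (board : List (List String)) :
    (PySem.List.pyRange 0 (board.length : Int) 1).foldl (fun acc i =>
      (PySem.List.pyRange 0 (board.length : Int) 1).foldl (fun acc j =>
        if PySem.List.pyGetD (PySem.List.pyGetD board i []) j "" = "#" then acc ++ [(i, j)]
        else acc) acc) [] = pvCs board := by
  have hinner : ∀ (acc : List (Int × Int)) (i : Int),
      (PySem.List.pyRange 0 (board.length : Int) 1).foldl (fun acc j =>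
        if PySem.List.pyGetD (PySem.List.pyGetD board i []) j "" = "#" then acc ++ [(i, j)]
        else acc) acc
      = acc ++ ((PySem.List.pyRange 0 (board.length : Int) 1).filter
          (fun j => decide (PySem.List.pyGetD (PySem.List.pyGetD board i []) j "" = "#"))).map
            (fun j => (i, j)) := by
    intro acc i
    exact PySem.List.foldl_append_ite
      (p := fun j => PySem.List.pyGetD (PySem.List.pyGetD board i []) j "" = "#")
      (f := fun j => (i, j)) _ acc
  rw [show (fun (acc : List (Int × Int)) (i : Int) =>
        (PySem.List.pyRange 0 (board.length : Int) 1).foldl (fun acc j =>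
          if PySem.List.pyGetD (PySem.List.pyGetD board i []) j "" = "#" then acc ++ [(i, j)]
          else acc) acc)
      = (fun (acc : List (Int × Int)) (i : Int) =>
          acc ++ ((PySem.List.pyRange 0 (board.length : Int) 1).filter
            (fun j => decide (PySem.List.pyGetD (PySem.List.pyGetD board i []) j "" = "#"))).map
              (fun j => (i, j)))
      from funext fun acc => funext fun i => hinner acc i]
  rw [PySem.List.foldl_append_eq_flatMap, List.nil_append]
  unfold pvCs pvGridP
  rw [List.filter_flatMap]
  have hswap : ∀ i : Int,
      ((PySem.List.pyRange 0 (board.length : Int) 1).map (fun j => (i, j))).filter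
          (fun c => decide (pvCell board c.1 c.2 = "#"))
        = ((PySem.List.pyRange 0 (board.length : Int) 1).filter
            (fun j => decide (PySem.List.pyGetD (PySem.List.pyGetD board i []) j "" = "#"))).map
              (fun j => (i, j)) := by
    intro i
    rw [List.filter_map]
    rfl
  simp only [hswap]

lemma pvBoxB (board : List (List String)) :
    (PySem.List.pyRange 0 (board.length : Int) 1).foldl (fun st i =>
      (PySem.List.pyRange 0 (board.length : Int) 1).foldl (fun st j =>
        if PySem.List.pyGetD (PySem.List.pyGetD board i []) j "" = "#" then
          match st with
          | none => some (i, i, j, j)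
          | some (a, b, c, d) => some (min a i, max b i, min c j, max d j)
        else st) st) none = (pvCs board).foldl pvUpd none := by
  have hinner : ∀ (st : Option (Int × Int × Int × Int)) (i : Int),
      (PySem.List.pyRange 0 (board.length : Int) 1).foldl (fun st j =>
        if PySem.List.pyGetD (PySem.List.pyGetD board i []) j "" = "#" then
          match st with
          | none => some (i, i, j, j)
          | some (a, b, c, d) => some (min a i, max b i, min c j, max d j)
        else st) st
      = ((PySem.List.pyRange 0 (board.length : Int) 1).map (fun j => (i, j))).foldl
          (fun st c => if pvCell board c.1 c.2 = "#" then pvUpd st c else st) st := by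
    intro st i
    rw [List.foldl_map]
    rfl
  rw [show (fun (st : Option (Int × Int × Int × Int)) (i : Int) =>
        (PySem.List.pyRange 0 (board.length : Int) 1).foldl (fun st j =>
          if PySem.List.pyGetD (PySem.List.pyGetD board i []) j "" = "#" then
            match st with
            | none => some (i, i, j, j)
            | some (a, b, c, d) => some (min a i, max b i, min c j, max d j)
          else st) st)
      = (fun (st : Option (Int × Int × Int × Int)) (i : Int) =>
          ((PySem.List.pyRange 0 (board.length : Int) 1).map (fun j => (i, j))).foldl
            (fun st c => if pvCell board c.1 c.2 = "#" then pvUpd st c else st) st)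
      from funext fun st => funext fun i => hinner st i]
  rw [← List.foldl_flatMap]
  rw [PySem.List.foldl_ite_eq_foldl_filter (p := fun c : Int × Int => pvCell board c.1 c.2 = "#") pvUpd]
  rfl

lemma pvFoldUpd (t : List (Int × Int)) : ∀ (a b c d : Int),
    t.foldl pvUpd (some (a, b, c, d)) =
      some (t.foldl (fun x y => min x y.1) a, t.foldl (fun x y => max x y.1) b,
            t.foldl (fun x y => min x y.2) c, t.foldl (fun x y => max x y.2) d) := by
  induction t with
  | nil => intro a b c d; rfl
  | cons e t ih =>
    intro a b c d
    simp only [List.foldl_cons]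
    exact ih (min a e.1) (max b e.1) (min c e.2) (max d e.2)

lemma pvMemCs (board : List (List String)) (i j : Int) :
    (i, j) ∈ pvCs board ↔
      (0 ≤ i ∧ i < (board.length : Int)) ∧ (0 ≤ j ∧ j < (board.length : Int)) ∧
        pvCell board i j = "#" := by
  unfold pvCs
  rw [List.mem_filter, pvGridP_mem]
  simp [PySem.List.mem_pyRange_one, and_assoc]

lemma pvNodupCs (board : List (List String)) : (pvCs board).Nodup :=
  List.Nodup.filter _ (pvGridP_nodup _ _ (PySem.List.nodup_pyRange_one _ _) (PySem.List.nodup_pyRange_one _ _))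

lemma pvCsNe (board : List (List String)) (hpre : Pre_solution board) : pvCs board ≠ [] := by
  obtain ⟨hrows, hany⟩ := hpre
  rw [List.any_eq_true] at hany
  obtain ⟨row, hrow, hr2⟩ := hany
  rw [List.any_eq_true] at hr2
  obtain ⟨s, hs, hs2⟩ := hr2
  rw [beq_iff_eq] at hs2
  obtain ⟨i, hi, hieq⟩ := List.mem_iff_getElem.mp hrow
  obtain ⟨j, hj, hjeq⟩ := List.mem_iff_getElem.mp hs
  have hjlt : j < board.length := lt_of_lt_of_le hj (by simp [List.length_take])
  have hjrow : j < row.length := lt_of_lt_of_le hj (by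
    simp only [List.length_take]
    exact le_trans (min_le_left _ _) (hrows row hrow))
  simp only [List.getElem_take] at hjeq
  have hcell : pvCell board (i : Int) (j : Int) = "#" := by
    unfold pvCell
    have hb : PySem.List.pyGetD board ((i : Int)) [] = row := by
      rw [PySem.List.pyGetD_eq_getElem board [] (Int.natCast_nonneg i) (by exact_mod_cast hi)]
      simpa using hieq
    rw [hb]
    rw [PySem.List.pyGetD_eq_getElem row "" (Int.natCast_nonneg j) (by exact_mod_cast hjrow)]
    simp only [Int.toNat_natCast]
    rw [hjeq]
    exact hs2
  intro hnil
  have hmem : ((i : Int), (j : Int)) ∈ pvCs board := by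
    rw [pvMemCs]
    exact ⟨⟨Int.natCast_nonneg i, by exact_mod_cast hi⟩,
      ⟨Int.natCast_nonneg j, by exact_mod_cast hjlt⟩, hcell⟩
  rw [hnil] at hmem
  exact List.not_mem_nil hmem

-- The counting argument: for a nonvoid nodup cell list confined to its bounding box,
-- area = count  ↔  every box cell is '#'.
lemma pvBoxCount (board : List (List String)) (cs : List (Int × Int)) (mnx mxx mny mxy : Int)
    (hmem : ∀ c : Int × Int, c ∈ cs ↔
      (0 ≤ c.1 ∧ c.1 < (board.length : Int)) ∧ (0 ≤ c.2 ∧ c.2 < (board.length : Int)) ∧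
        pvCell board c.1 c.2 = "#")
    (hnd : cs.Nodup)
    (hlb : ∀ c ∈ cs, mnx ≤ c.1 ∧ c.1 ≤ mxx ∧ mny ≤ c.2 ∧ c.2 ≤ mxy)
    (hmnx : mnx ∈ cs.map Prod.fst) (hmxx : mxx ∈ cs.map Prod.fst)
    (hmny : mny ∈ cs.map Prod.snd) (hmxy : mxy ∈ cs.map Prod.snd) :
    ((mxx - mnx + 1) * (mxy - mny + 1) = (cs.length : Int)) ↔
      ∀ i : Int, mnx ≤ i → i < mxx + 1 → ∀ j : Int, mny ≤ j → j < mxy + 1 →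
        pvCell board i j = "#" := by
  obtain ⟨cx, hcx, hcx1⟩ := List.mem_map.mp hmnx
  obtain ⟨dx, hdx, hdx1⟩ := List.mem_map.mp hmxx
  obtain ⟨cy, hcy, hcy1⟩ := List.mem_map.mp hmny
  obtain ⟨dy, hdy, hdy1⟩ := List.mem_map.mp hmxy
  have h0mnx : 0 ≤ mnx := hcx1 ▸ ((hmem cx).mp hcx).1.1
  have hmxxn : mxx < (board.length : Int) := hdx1 ▸ ((hmem dx).mp hdx).1.2
  have h0mny : 0 ≤ mny := hcy1 ▸ ((hmem cy).mp hcy).2.1.1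
  have hmxyn : mxy < (board.length : Int) := hdy1 ▸ ((hmem dy).mp hdy).2.1.2
  have hxle : mnx ≤ mxx := hcx1 ▸ (hlb cx hcx).2.1
  have hyle : mny ≤ mxy := hcy1 ▸ (hlb cy hcy).2.2.2
  set Bp : List (Int × Int) :=
    pvGridP (PySem.List.pyRange mnx (mxx + 1) 1) (PySem.List.pyRange mny (mxy + 1) 1) with hBp
  have hBpmem : ∀ i j : Int, (i, j) ∈ Bp ↔ (mnx ≤ i ∧ i < mxx + 1) ∧ (mny ≤ j ∧ j < mxy + 1) := by
    intro i j
    rw [hBp, pvGridP_mem, PySem.List.mem_pyRange_one, PySem.List.mem_pyRange_one]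
  have hBpnd : Bp.Nodup :=
    pvGridP_nodup _ _ (PySem.List.nodup_pyRange_one _ _) (PySem.List.nodup_pyRange_one _ _)
  have hcssub : cs ⊆ Bp := by
    intro c hc
    obtain ⟨h1, h2, h3, h4⟩ := hlb c hc
    have := (hBpmem c.1 c.2).mpr ⟨⟨h1, by omega⟩, ⟨h3, by omega⟩⟩
    simpa using this
  have hBplen : (Bp.length : Int) = (mxx - mnx + 1) * (mxy - mny + 1) := by
    rw [hBp, pvGridP_len, PySem.List.length_pyRange_one, PySem.List.length_pyRange_one]
    push_cast
    rw [Int.toNat_of_nonneg (by omega), Int.toNat_of_nonneg (by omega)]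
    ring
  have hfill : (Bp ⊆ cs) ↔
      (∀ i : Int, mnx ≤ i → i < mxx + 1 → ∀ j : Int, mny ≤ j → j < mxy + 1 →
        pvCell board i j = "#") := by
    constructor
    · intro hsub i hi1 hi2 j hj1 hj2
      have : (i, j) ∈ cs := hsub ((hBpmem i j).mpr ⟨⟨hi1, hi2⟩, ⟨hj1, hj2⟩⟩)
      exact ((hmem (i, j)).mp this).2.2
    · intro hall c hc
      have hb := (hBpmem c.1 c.2).mp (by simpa using hc)
      refine (hmem c).mpr ⟨⟨by omega, by omega⟩, ⟨by omega, by omega⟩,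
        hall c.1 hb.1.1 hb.1.2 c.2 hb.2.1 hb.2.2⟩
  rw [← hfill]
  constructor
  · intro hcount
    have hlen : Bp.length = cs.length := by
      have : (Bp.length : Int) = (cs.length : Int) := by rw [hBplen, hcount]
      exact_mod_cast this
    have hsubF : cs.toFinset ⊆ Bp.toFinset := by
      intro x hx
      rw [List.mem_toFinset] at *
      exact hcssub hx
    have hcard : Bp.toFinset.card ≤ cs.toFinset.card := by
      rw [List.toFinset_card_of_nodup hnd, List.toFinset_card_of_nodup hBpnd, hlen]
    have := Finset.eq_of_subset_of_card_le hsubF hcard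
    intro c hc
    have : c ∈ cs.toFinset := this ▸ (List.mem_toFinset.mpr hc)
    exact List.mem_toFinset.mp this
  · intro hsub
    have hFeq : cs.toFinset = Bp.toFinset := by
      apply Finset.Subset.antisymm
      · intro x hx; rw [List.mem_toFinset] at *; exact hcssub hx
      · intro x hx; rw [List.mem_toFinset] at *; exact hsub hx
    have : cs.length = Bp.length := by
      rw [← List.toFinset_card_of_nodup hnd, ← List.toFinset_card_of_nodup hBpnd, hFeq]
    rw [← hBplen, this]

-- ===== VERDICT (by name: the statement is the Claim_ definition above) =====
theorem solution_spec : Claim_equal_solution := by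
  intro board _ hpre
  unfold Spec_solution solution solution_alt
  simp only []
  rw [pvLstA, pvBoxB]
  rcases hcs : pvCs board with _ | ⟨h, t⟩
  · exact absurd hcs (pvCsNe board hpre)
  · rw [List.foldl_cons]
    rw [show pvUpd none h = some (h.1, h.1, h.2, h.2) from rfl]
    rw [pvFoldUpd]
    set mnx := t.foldl (fun x y => min x y.1) h.1 with hmnxdef
    set mxx := t.foldl (fun x y => max x y.1) h.1 with hmxxdef
    set mny := t.foldl (fun x y => min x y.2) h.2 with hmnydef
    set mxy := t.foldl (fun x y => max x y.2) h.2 with hmxydef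
    simp only [List.map_cons, PySem.List.min?_id_cons, PySem.List.max?_id_cons,
      Option.getD_some, List.foldl_map]
    simp only [← hmnxdef, ← hmxxdef, ← hmnydef, ← hmxydef]
    have hmemc : ∀ c : Int × Int, c ∈ h :: t ↔
        (0 ≤ c.1 ∧ c.1 < (board.length : Int)) ∧ (0 ≤ c.2 ∧ c.2 < (board.length : Int)) ∧
          pvCell board c.1 c.2 = "#" := by
      intro c
      rcases c with ⟨i, j⟩
      rw [← hcs]
      exact pvMemCs board i j
    have hnd : (h :: t).Nodup := hcs ▸ pvNodupCs board
    have hconvx : mnx = (t.map Prod.fst).foldl min h.1 := by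
      rw [hmnxdef, List.foldl_map]
    have hconvX : mxx = (t.map Prod.fst).foldl max h.1 := by
      rw [hmxxdef, List.foldl_map]
    have hconvy : mny = (t.map Prod.snd).foldl min h.2 := by
      rw [hmnydef, List.foldl_map]
    have hconvY : mxy = (t.map Prod.snd).foldl max h.2 := by
      rw [hmxydef, List.foldl_map]
    have hlb : ∀ c ∈ h :: t, mnx ≤ c.1 ∧ c.1 ≤ mxx ∧ mny ≤ c.2 ∧ c.2 ≤ mxy := by
      intro c hc
      have hminf := PySem.List.foldl_min_le (t.map Prod.fst) h.1
      have hmaxf := PySem.List.le_foldl_max (t.map Prod.fst) h.1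
      have hming := PySem.List.foldl_min_le (t.map Prod.snd) h.2
      have hmaxg := PySem.List.le_foldl_max (t.map Prod.snd) h.2
      rw [← hconvx] at hminf
      rw [← hconvX] at hmaxf
      rw [← hconvy] at hming
      rw [← hconvY] at hmaxg
      rcases List.mem_cons.mp hc with rfl | hct
      · exact ⟨hminf.1, hmaxf.1, hming.1, hmaxg.1⟩
      · exact ⟨hminf.2 c.1 (List.mem_map.mpr ⟨c, hct, rfl⟩),
          hmaxf.2 c.1 (List.mem_map.mpr ⟨c, hct, rfl⟩),
          hming.2 c.2 (List.mem_map.mpr ⟨c, hct, rfl⟩),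
          hmaxg.2 c.2 (List.mem_map.mpr ⟨c, hct, rfl⟩)⟩
    have hmnxm : mnx ∈ (h :: t).map Prod.fst := by
      rw [List.map_cons]
      rcases PySem.List.foldl_min_mem (t.map Prod.fst) h.1 with he | he
      · exact (hconvx.trans he) ▸ List.mem_cons_self ..
      · exact List.mem_cons_of_mem _ (hconvx ▸ he)
    have hmxxm : mxx ∈ (h :: t).map Prod.fst := by
      rw [List.map_cons]
      rcases PySem.List.foldl_max_mem (t.map Prod.fst) h.1 with he | he
      · exact (hconvX.trans he) ▸ List.mem_cons_self ..
      · exact List.mem_cons_of_mem _ (hconvX ▸ he)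
    have hmnym : mny ∈ (h :: t).map Prod.snd := by
      rw [List.map_cons]
      rcases PySem.List.foldl_min_mem (t.map Prod.snd) h.2 with he | he
      · exact (hconvy.trans he) ▸ List.mem_cons_self ..
      · exact List.mem_cons_of_mem _ (hconvy ▸ he)
    have hmxym : mxy ∈ (h :: t).map Prod.snd := by
      rw [List.map_cons]
      rcases PySem.List.foldl_max_mem (t.map Prod.snd) h.2 with he | he
      · exact (hconvY.trans he) ▸ List.mem_cons_self ..
      · exact List.mem_cons_of_mem _ (hconvY ▸ he)
    have hcnt := pvBoxCount board (h :: t) mnx mxx mny mxy hmemc hnd hlb hmnxm hmxxm hmnym hmxym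
    by_cases hsq : mxx - mnx = mxy - mny
    · rw [if_neg (not_not_intro hsq)]
      have hbridge : ((PySem.List.pyRange mnx (mxx + 1) 1).all fun i =>
            (PySem.List.pyRange mny (mxy + 1) 1).all fun j =>
              PySem.List.pyGetD (PySem.List.pyGetD board i []) j "" == "#") = true ↔
          (∀ i : Int, mnx ≤ i → i < mxx + 1 → ∀ j : Int, mny ≤ j → j < mxy + 1 →
            pvCell board i j = "#") := by
        simp [List.all_eq_true, PySem.List.mem_pyRange_one, beq_iff_eq, pvCell, and_imp]
      by_cases hall : ∀ i : Int, mnx ≤ i → i < mxx + 1 → ∀ j : Int, mny ≤ j → j < mxy + 1 →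
          pvCell board i j = "#"
      · rw [if_pos ⟨by omega, hcnt.mpr hall⟩, if_pos (hbridge.mpr hall)]
      · rw [if_neg (fun hcond => hall (hcnt.mp hcond.2)), if_neg (fun hb => hall (hbridge.mp hb))]
    · rw [if_pos hsq, if_neg (fun hcond => hsq (by omega))]
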